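-- pv_equiv track=rewrite | github.com/Netzer7/Codepath-SE101 | singleton_only.py | singleton_elements
-- ===== SOURCE A (Python) =====
-- def singleton_elements(mylist):
--   d = {}
--   for num in mylist:
--     if num in d:
--       d[num] += 1
--     else:
--       d[num] = 1
--   result = []
--   for item, count in d.items():
--     if count == 1:
--       result.append(item)
--   return result
-- ===== SOURCE B (Python) =====
-- def singleton_elements(mylist):
--   # duplicate detection with two sets: no counts are ever kept
--   seen = set()
--   dupes = set()
--   for x in mylist:
--     if x in seen:
--       dupes.add(x)
--     else:
--       seen.add(x)
--   return [x for x in mylist if x not in dupes]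
-- ===== Notes on version B (the rewrite author's own statement) =====
-- stated objective: alternative
-- what changed: Replaces the count dictionary and the filter over its items by boolean duplicate detection: one pass maintains two sets (seen, dupes) with no counts, then a comprehension over the original list keeps the elements not in dupes (each such element occurs exactly once, so order and multiplicity match).
import Mathlib
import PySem

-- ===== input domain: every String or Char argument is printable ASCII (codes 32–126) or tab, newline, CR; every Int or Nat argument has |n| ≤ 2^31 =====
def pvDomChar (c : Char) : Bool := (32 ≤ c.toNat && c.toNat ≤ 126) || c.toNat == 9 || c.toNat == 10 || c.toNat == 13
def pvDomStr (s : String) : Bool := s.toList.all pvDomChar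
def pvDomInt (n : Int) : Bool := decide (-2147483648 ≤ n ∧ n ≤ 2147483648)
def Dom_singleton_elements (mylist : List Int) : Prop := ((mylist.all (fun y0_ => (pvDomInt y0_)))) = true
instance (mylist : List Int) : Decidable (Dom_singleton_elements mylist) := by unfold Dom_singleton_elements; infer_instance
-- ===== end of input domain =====

-- B replaces A's count dictionary by boolean duplicate detection: one pass maintains two
-- sets (seen, dupes) with no counts, then filters the original list by 'not in dupes'.

-- ===== PORT A =====
def singleton_elements (mylist : List Int) : List Int :=
  let d := mylist.foldl
    (fun d num => if d.contains num then d.insert num (d.getD num 0 + 1) else d.insert num 1)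
    (PySem.Dict.empty : PySem.Dict Int Int)
  d.items.foldl (fun result p => if p.2 = 1 then result ++ [p.1] else result) []

-- ===== PORT B =====
def singleton_elements_alt (mylist : List Int) : List Int :=
  let sd := mylist.foldl
    (fun (p : PySem.Set Int × PySem.Set Int) x =>
      if p.1.contains x then (p.1, PySem.Set.add p.2 x) else (PySem.Set.add p.1 x, p.2))
    (PySem.Set.empty, PySem.Set.empty)
  mylist.filter (fun x => !sd.2.contains x)

-- ===== PRECONDITION & SPEC =====
def Spec_singleton_elements (mylist : List Int) (out : List Int) : Prop := out = singleton_elements_alt mylist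
instance (mylist : List Int) (out : List Int) : Decidable (Spec_singleton_elements mylist out) := by unfold Spec_singleton_elements; infer_instance

-- ===== CLAIM (what is proved, stated in full; the proofs are below) =====
def Claim_equal_singleton_elements : Prop := ∀ (mylist : List Int), Dom_singleton_elements mylist → Spec_singleton_elements mylist (singleton_elements mylist)

-- ===== LEMMAS AND PROOFS =====

-- A's counting loop builds exactly collections.Counter(mylist)
lemma fold_eq_counter (xs : List Int) :
    xs.foldl
      (fun d num => if d.contains num then d.insert num (d.getD num 0 + 1) else d.insert num 1)
      PySem.Dict.empty = PySem.Dict.counter xs := by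
  have h : (fun (d : PySem.Dict Int Int) num =>
      if d.contains num then d.insert num (d.getD num 0 + 1) else d.insert num 1)
      = fun d x => d.insert x (d.getD x 0 + 1) := by
    funext d x
    by_cases h : d.contains x
    · simp [h]
    · rw [PySem.Dict.getD_of_not_contains _ _ (by simpa using h)]
      simp [h]
  rw [h, PySem.Dict.foldl_insert_getD_add_one_eq_counter]

-- A's value: the distinct elements (first occurrences) whose count is 1
lemma a_eq_dedup_filter (xs : List Int) :
    singleton_elements xs = (PySem.List.dedup xs).filter (fun x => xs.count x == 1) := by
  unfold singleton_elements
  simp only []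
  rw [fold_eq_counter xs, PySem.Dict.items_counter]
  rw [show (fun (result : List Int) (p : Int × Int) => if p.2 = 1 then result ++ [p.1] else result)
      = (fun acc p => if (fun q : Int × Int => decide (q.2 = 1)) p then acc ++ [Prod.fst p] else acc)
      from by funext a p; simp]
  rw [PySem.List.foldl_append_if (fun p : Int × Int => decide (p.2 = 1)) Prod.fst]
  rw [List.filter_map, List.map_map]
  simp only [PySem.List.dedup_eq_ofList]
  rw [show ((fun q : Int × Int => decide (q.2 = 1)) ∘ fun k => (k, (List.count k xs : Int)))
      = (fun x => List.count x xs == 1) from by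
    funext k
    by_cases h : List.count k xs = 1 <;> simp [h]]
  simp [Function.comp_def]

-- the loop's dupes set holds exactly the elements seen at least twice
lemma fold_dupes_mem (xs : List Int) (s d : List Int) (x : Int) :
    x ∈ (xs.foldl
      (fun (p : PySem.Set Int × PySem.Set Int) y =>
        if p.1.contains y then (p.1, PySem.Set.add p.2 y) else (PySem.Set.add p.1 y, p.2))
      (s, d)).2
    ↔ (x ∈ d ∨ (x ∈ s ∧ x ∈ xs) ∨ 2 ≤ xs.count x) := by
  induction xs generalizing s d with
  | nil => simp
  | cons y ys ih =>
    simp only [List.foldl_cons]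
    have hcount : (x ∈ ys ∧ 1 ≤ ys.count x) ∨ (x ∉ ys ∧ ys.count x = 0) := by
      by_cases h : x ∈ ys
      · exact Or.inl ⟨h, List.count_pos_iff.2 h⟩
      · exact Or.inr ⟨h, List.count_eq_zero.2 h⟩
    by_cases hy : y ∈ s
    · rw [if_pos (by simpa using hy), ih]
      simp only [PySem.Set.mem_add, List.mem_cons, List.count_cons]
      by_cases hxy : y = x
      · subst hxy
        rcases hcount with ⟨h1, h2⟩ | ⟨h1, h2⟩ <;>
          simp_all
      · have hxy' : ¬ x = y := fun h => hxy h.symm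
        rcases hcount with ⟨h1, h2⟩ | ⟨h1, h2⟩ <;>
          simp_all
    · rw [if_neg (by simpa using hy), ih]
      simp only [PySem.Set.mem_add, List.mem_cons, List.count_cons]
      by_cases hxy : y = x
      · subst hxy
        rcases hcount with ⟨h1, h2⟩ | ⟨h1, h2⟩ <;>
          simp_all
      · have hxy' : ¬ x = y := fun h => hxy h.symm
        rcases hcount with ⟨h1, h2⟩ | ⟨h1, h2⟩ <;>
          simp_all

-- B's value: the occurrences whose count in the whole list is 1
lemma b_eq_filter (xs : List Int) :
    singleton_elements_alt xs = xs.filter (fun x => xs.count x == 1) := by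
  unfold singleton_elements_alt
  refine List.filter_congr ?_
  intro x hx
  have hmem := fold_dupes_mem xs PySem.Set.empty PySem.Set.empty x
  have hpos : 0 < xs.count x := List.count_pos_iff.2 hx
  by_cases h2 : 2 ≤ xs.count x
  · have hin : x ∈ (xs.foldl
        (fun (p : PySem.Set Int × PySem.Set Int) y =>
          if p.1.contains y then (p.1, PySem.Set.add p.2 y) else (PySem.Set.add p.1 y, p.2))
        (PySem.Set.empty, PySem.Set.empty)).2 := hmem.2 (Or.inr (Or.inr h2))
    have hb : ((xs.foldl
        (fun (p : PySem.Set Int × PySem.Set Int) y =>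
          if p.1.contains y then (p.1, PySem.Set.add p.2 y) else (PySem.Set.add p.1 y, p.2))
        (PySem.Set.empty, PySem.Set.empty)).2.contains x) = true :=
      List.contains_iff_mem.2 hin
    rw [hb]
    simp [show ¬ xs.count x = 1 from by omega]
  · have hout : ¬ x ∈ (xs.foldl
        (fun (p : PySem.Set Int × PySem.Set Int) y =>
          if p.1.contains y then (p.1, PySem.Set.add p.2 y) else (PySem.Set.add p.1 y, p.2))
        (PySem.Set.empty, PySem.Set.empty)).2 := by
      intro hc
      rcases hmem.1 hc with h | h | h
      · simp [PySem.Set.empty] at h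
      · simp [PySem.Set.empty] at h
      · omega
    have hb : ((xs.foldl
        (fun (p : PySem.Set Int × PySem.Set Int) y =>
          if p.1.contains y then (p.1, PySem.Set.add p.2 y) else (PySem.Set.add p.1 y, p.2))
        (PySem.Set.empty, PySem.Set.empty)).2.contains x) = false := by
      rw [Bool.eq_false_iff]
      intro hc
      exact hout (List.contains_iff_mem.1 hc)
    rw [hb]
    simp [show xs.count x = 1 from by omega]

-- dedup is a subsequence of the original list
lemma foldl_add_sublist (xs s : List Int) :
    ∃ t, xs.foldl PySem.Set.add s = s ++ t ∧ t.Sublist xs := by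
  induction xs generalizing s with
  | nil => exact ⟨[], by simp⟩
  | cons x xs ih =>
    by_cases hx : x ∈ s
    · obtain ⟨t, ht, hs⟩ := ih s
      refine ⟨t, ?_, hs.cons x⟩
      simpa [PySem.Set.add, hx] using ht
    · obtain ⟨t, ht, hs⟩ := ih (s ++ [x])
      refine ⟨x :: t, ?_, hs.cons₂ x⟩
      simpa [PySem.Set.add, hx] using ht

lemma dedup_sublist (xs : List Int) : (PySem.List.dedup xs).Sublist xs := by
  rw [PySem.List.dedup_eq_ofList, PySem.Set.ofList_eq_foldl]
  obtain ⟨t, ht, hs⟩ := foldl_add_sublist xs []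
  simpa [ht] using hs

-- filtering the dedup by count-1 equals filtering the list itself
lemma dedup_filter_eq (xs : List Int) :
    (PySem.List.dedup xs).filter (fun x => xs.count x == 1)
      = xs.filter (fun x => xs.count x == 1) := by
  have hsub : ((PySem.List.dedup xs).filter (fun x => xs.count x == 1)).Sublist
      (xs.filter (fun x => xs.count x == 1)) := (dedup_sublist xs).filter _
  have hnodup : (xs.filter (fun x => xs.count x == 1)).Nodup := by
    rw [List.nodup_iff_count_le_one]
    intro a
    by_cases ha : a ∈ xs.filter (fun x => xs.count x == 1)
    · have h1 : xs.count a = 1 := by simpa using (List.of_mem_filter ha)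
      calc (xs.filter (fun x => xs.count x == 1)).count a ≤ xs.count a :=
            (List.filter_sublist).count_le a
        _ ≤ 1 := by omega
    · simp [List.count_eq_zero.2 ha]
  have hsubset : (xs.filter (fun x => xs.count x == 1)) ⊆
      ((PySem.List.dedup xs).filter (fun x => xs.count x == 1)) := by
    intro a ha
    rw [List.mem_filter] at ha ⊢
    exact ⟨(PySem.List.mem_dedup xs a).2 ha.1, ha.2⟩
  exact hsub.eq_of_length (le_antisymm hsub.length_le ((hnodup.subperm hsubset).length_le))

-- ===== VERDICT (by name: the statement is the Claim_ definition above) =====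
theorem singleton_elements_spec : Claim_equal_singleton_elements := by
  intro mylist _
  unfold Spec_singleton_elements
  rw [a_eq_dedup_filter, b_eq_filter, dedup_filter_eq]
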